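-- pv_equiv track=rewrite | github.com/HarukaSakura/PaperLM | src/dataset.py | generateNRPLabel
-- ===== SOURCE A (Python) =====
-- def judgeRelation(node1, node2):
--     if len(node1) == 0 or len(node2) == 0:
--         return -100 # -100 ignore
--     if node1 == node2:
--         return 0
--     min_len = min(len(node1), len(node2))
--     i = 0
--     while i < min_len and node1[i] == node2[i]:
--         i += 1
--     if i == len(node1):
--         if len(node2) - len(node1) == 1:
--             return 1
--         else:
--             return 4
--     elif i == len(node2):
--         if len(node1) - len(node2) == 1:
--             return 2
--         else:
--             return 5
--     elif i == len(node1)-1 == len(node2)-1: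
--         return 3
--     else:
--         return 6
--
-- def generateNRPLabel(eot_arr, max_length):
--     # self 0, parent 1, child 2, sibling 3, ancestor 4, descendent 5, others 6
--     nodeRelation = []
--     originLen = len(eot_arr)
--     difference = max_length - 2 - originLen
--     eot_arr.insert(0, [])
--     eot_arr.append([])
--     for i in range(difference):
--         eot_arr.append([])
--     for i in range(max_length):
--         for j in range(max_length):
--             nodeRelation.append(judgeRelation(eot_arr[i], eot_arr[j]))
--     return nodeRelation
-- ===== SOURCE B (Python) =====
-- def _relation(u, v):
--     # slice-based classification instead of the element-by-element scan
--     if not u or not v: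
--         return -100
--     if u == v:
--         return 0
--     lu, lv = len(u), len(v)
--     if lu < lv and v[:lu] == u:
--         return 1 if lv - lu == 1 else 4
--     if lv < lu and u[:lv] == v:
--         return 2 if lu - lv == 1 else 5
--     if lu == lv and u[:-1] == v[:-1]:
--         return 3
--     return 6
--
-- def generateNRPLabel(eot_arr, max_length):
--     # same in-place padding of eot_arr as the original (callers may observe it)
--     origin_len = len(eot_arr)
--     eot_arr.insert(0, [])
--     eot_arr.append([])
--     eot_arr.extend([] for _ in range(max_length - 2 - origin_len))
--     nodes = [tuple(n) for n in eot_arr[:max_length]] if max_length > 0 else []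
--     cache = {}
--     labels = []
--     for u in nodes:
--         for v in nodes:
--             r = cache.get((u, v))
--             if r is None:
--                 r = _relation(u, v)
--                 cache[(u, v)] = r
--             labels.append(r)
--     return labels
-- ===== Notes on version B (the rewrite author's own statement) =====
-- stated objective: alternative
-- what changed: B classifies each pair by whole-slice prefix comparisons instead of A's element-by-element while-loop scan, and memoizes the relation per distinct (node, node) pair in a dict so repeated pairs (e.g. all the empty padding rows) are computed once.
import Mathlib
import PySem

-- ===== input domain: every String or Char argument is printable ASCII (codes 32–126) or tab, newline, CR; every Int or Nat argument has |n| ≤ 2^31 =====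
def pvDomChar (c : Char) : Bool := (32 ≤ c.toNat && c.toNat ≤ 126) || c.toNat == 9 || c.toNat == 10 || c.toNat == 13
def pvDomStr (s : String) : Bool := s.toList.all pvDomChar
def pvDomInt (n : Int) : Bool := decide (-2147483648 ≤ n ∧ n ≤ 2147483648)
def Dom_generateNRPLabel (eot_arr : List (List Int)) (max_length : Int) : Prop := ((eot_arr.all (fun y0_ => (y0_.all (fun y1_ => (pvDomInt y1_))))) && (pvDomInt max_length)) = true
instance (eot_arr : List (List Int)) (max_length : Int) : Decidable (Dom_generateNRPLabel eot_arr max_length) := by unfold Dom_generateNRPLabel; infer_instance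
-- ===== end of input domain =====

-- B memoizes the pair-relation in a dict keyed by the two node paths and classifies a pair by
-- whole-slice prefix comparisons instead of A's element-by-element scan per pair (objective:
-- alternative). Return-value equivalence only: the Python A mutates eot_arr in place (B performs
-- the same mutation).

-- ===== PORT A =====
-- the 'while i < min_len and node1[i] == node2[i]: i += 1' loop of judgeRelation
def judgePrefix (node1 node2 : List Int) : Nat :=
  match node1, node2 with
  | a :: u, b :: v => if a = b then judgePrefix u v + 1 else 0
  | _, _ => 0

def judgeRelation (node1 node2 : List Int) : Int :=
  if node1.length = 0 ∨ node2.length = 0 then -100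
  else if node1 = node2 then 0
  else
    let i := judgePrefix node1 node2
    if i = node1.length then
      if (node2.length : Int) - node1.length = 1 then 1 else 4
    else if i = node2.length then
      if (node1.length : Int) - node2.length = 1 then 2 else 5
    else if (i : Int) = (node1.length : Int) - 1 ∧ (node1.length : Int) - 1 = (node2.length : Int) - 1 then 3
    else 6

def generateNRPLabel (eot_arr : List (List Int)) (max_length : Int) : List Int :=
  let originLen : Int := eot_arr.length
  let difference : Int := max_length - 2 - originLen
  let arr1 := ([] : List Int) :: eot_arr            -- eot_arr.insert(0, [])
  let arr2 := arr1 ++ [[]]                          -- eot_arr.append([])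
  let arr3 := (PySem.List.pyRange 0 difference 1).foldl (fun acc _ => acc ++ [([] : List Int)]) arr2
  (PySem.List.pyRange 0 max_length 1).foldl (fun nodeRelation i =>
    (PySem.List.pyRange 0 max_length 1).foldl (fun nodeRelation j =>
      nodeRelation ++ [judgeRelation (PySem.List.pyGetD arr3 i []) (PySem.List.pyGetD arr3 j [])])
      nodeRelation) []

-- ===== PORT B =====
def relation_alt (u v : List Int) : Int :=
  if u = [] ∨ v = [] then -100
  else if u = v then 0
  else
    let lu := u.length
    let lv := v.length
    if lu < lv ∧ PySem.List.slice v none (some (lu : Int)) = u then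
      if (lv : Int) - lu = 1 then 1 else 4
    else if lv < lu ∧ PySem.List.slice u none (some (lv : Int)) = v then
      if (lu : Int) - lv = 1 then 2 else 5
    else if lu = lv ∧ PySem.List.slice u none (some (-1 : Int)) = PySem.List.slice v none (some (-1 : Int)) then 3
    else 6

def generateNRPLabel_alt (eot_arr : List (List Int)) (max_length : Int) : List Int :=
  let originLen : Int := eot_arr.length
  -- same in-place padding; 'extend([] for _ in range(k))' appends max(k,0) empty lists
  let padded := (([] : List Int) :: eot_arr) ++ [[]] ++ List.replicate (max_length - 2 - originLen).toNat []
  -- Python's tuple(n) keys correspond to the List Int nodes themselves here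
  let nodes := if max_length > 0 then PySem.List.slice padded none (some max_length) else []
  (nodes.foldl (fun st u =>
     nodes.foldl (fun st2 v =>
       match st2.1.get? (u, v) with
       | some r => (st2.1, st2.2 ++ [r])
       | none =>
         let r := relation_alt u v
         (st2.1.insert (u, v) r, st2.2 ++ [r])) st)
    ((PySem.Dict.empty : PySem.Dict (List Int × List Int) Int), ([] : List Int))).2

-- ===== PRECONDITION & SPEC =====
def Spec_generateNRPLabel (eot_arr : List (List Int)) (max_length : Int) (out : List Int) : Prop := out = generateNRPLabel_alt eot_arr max_length
instance (eot_arr : List (List Int)) (max_length : Int) (out : List Int) : Decidable (Spec_generateNRPLabel eot_arr max_length out) := by unfold Spec_generateNRPLabel; infer_instance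

-- ===== CLAIM (what is proved, stated in full; the proofs are below) =====
def Claim_equal_generateNRPLabel : Prop := ∀ (eot_arr : List (List Int)) (max_length : Int), Dom_generateNRPLabel eot_arr max_length → Spec_generateNRPLabel eot_arr max_length (generateNRPLabel eot_arr max_length)

-- ===== LEMMAS AND PROOFS =====

theorem judgePrefix_le_left (u v : List Int) : judgePrefix u v ≤ u.length := by
  induction u generalizing v with
  | nil => simp [judgePrefix]
  | cons a u ih =>
    cases v with
    | nil => simp [judgePrefix]
    | cons b v =>
      simp only [judgePrefix, List.length_cons]
      split_ifs with h
      · exact Nat.succ_le_succ (ih v)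
      · omega

theorem judgePrefix_le_right (u v : List Int) : judgePrefix u v ≤ v.length := by
  induction u generalizing v with
  | nil => simp [judgePrefix]
  | cons a u ih =>
    cases v with
    | nil => simp [judgePrefix]
    | cons b v =>
      simp only [judgePrefix, List.length_cons]
      split_ifs with h
      · exact Nat.succ_le_succ (ih v)
      · omega

theorem take_judgePrefix (u v : List Int) :
    u.take (judgePrefix u v) = v.take (judgePrefix u v) := by
  induction u generalizing v with
  | nil => simp [judgePrefix]
  | cons a u ih =>
    cases v with
    | nil => simp [judgePrefix]
    | cons b v =>
      simp only [judgePrefix]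
      split_ifs with h
      · simp [List.take_succ_cons, h, ih v]
      · simp

theorem le_judgePrefix (u v : List Int) (k : Nat) (hu : k ≤ u.length) (hv : k ≤ v.length)
    (h : u.take k = v.take k) : k ≤ judgePrefix u v := by
  induction u generalizing v k with
  | nil => simp_all
  | cons a u ih =>
    cases v with
    | nil => simp_all
    | cons b v =>
      cases k with
      | zero => omega
      | succ k =>
        simp only [List.take_succ_cons, List.cons.injEq] at h
        simp only [judgePrefix, if_pos h.1]
        have := ih v k (by simpa using hu) (by simpa using hv) h.2
        omega

theorem relation_eq (u v : List Int) : judgeRelation u v = relation_alt u v := by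
  by_cases hu : u = []
  · simp [judgeRelation, relation_alt, hu]
  by_cases hv : v = []
  · simp [judgeRelation, relation_alt, hv, List.length_eq_zero_iff]
  by_cases huv : u = v
  · simp [judgeRelation, relation_alt, huv, List.length_eq_zero_iff, hv]
  have hul : u.length ≠ 0 := by simpa [List.length_eq_zero_iff] using hu
  have hvl : v.length ≠ 0 := by simpa [List.length_eq_zero_iff] using hv
  have hle1 := judgePrefix_le_left u v
  have hle2 := judgePrefix_le_right u v
  have htk := take_judgePrefix u v
  -- branch 1: prefix-of condition
  have h1 : judgePrefix u v = u.length ↔ (u.length < v.length ∧ v.take u.length = u) := by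
    constructor
    · intro h
      have hpre : v.take u.length = u := by
        have := htk
        rw [h, List.take_length] at this
        exact this.symm
      have hlt : u.length < v.length := by
        rcases Nat.lt_or_ge u.length v.length with hlt | hge
        · exact hlt
        · exact absurd (hpre ▸ List.take_of_length_le hge) huv
      exact ⟨hlt, hpre⟩
    · rintro ⟨hlt, hpre⟩
      have h1 : u.take u.length = v.take u.length := by
        rw [List.take_length, hpre]
      have := le_judgePrefix u v u.length le_rfl (Nat.le_of_lt hlt) h1
      omega
  have h2 : judgePrefix u v = v.length ↔ (v.length < u.length ∧ u.take v.length = v) := by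
    constructor
    · intro h
      have hpre : u.take v.length = v := by
        have := htk
        rw [h, List.take_length] at this
        exact this
      have hlt : v.length < u.length := by
        rcases Nat.lt_or_ge v.length u.length with hlt | hge
        · exact hlt
        · exfalso
          apply huv
          rw [← hpre, List.take_of_length_le hge]
      exact ⟨hlt, hpre⟩
    · rintro ⟨hlt, hpre⟩
      have h1 : u.take v.length = v.take v.length := by
        rw [List.take_length, hpre]
      have := le_judgePrefix u v v.length (Nat.le_of_lt hlt) le_rfl h1
      omega
  simp only [judgeRelation, relation_alt, if_neg (by simp [hul, hvl] : ¬(u.length = 0 ∨ v.length = 0)),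
    if_neg (by simp [hu, hv] : ¬(u = [] ∨ v = [])), if_neg huv,
    PySem.List.slice_to_natCast, PySem.List.slice_to_neg_one]
  by_cases hc1 : judgePrefix u v = u.length
  · rw [if_pos hc1, if_pos (h1.mp hc1)]
  · rw [if_neg hc1, if_neg (fun h => hc1 (h1.mpr h))]
    by_cases hc2 : judgePrefix u v = v.length
    · rw [if_pos hc2, if_pos (h2.mp hc2)]
    · rw [if_neg hc2, if_neg (fun h => hc2 (h2.mpr h))]
      -- sibling branch
      have h3 : ((judgePrefix u v : Int) = (u.length : Int) - 1 ∧ (u.length : Int) - 1 = (v.length : Int) - 1)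
          ↔ (u.length = v.length ∧ u.dropLast = v.dropLast) := by
        constructor
        · rintro ⟨ha, hb⟩
          have hlen : u.length = v.length := by omega
          have hi : judgePrefix u v = u.length - 1 := by omega
          refine ⟨hlen, ?_⟩
          rw [List.dropLast_eq_take, List.dropLast_eq_take, ← hlen, ← hi, htk]
        · rintro ⟨hlen, hdl⟩
          have h1 : u.take (u.length - 1) = v.take (u.length - 1) := by
            rw [← List.dropLast_eq_take, hdl, List.dropLast_eq_take, hlen]
          have := le_judgePrefix u v (u.length - 1) (by omega) (by omega) h1
          omega
      by_cases hc3 : (judgePrefix u v : Int) = (u.length : Int) - 1 ∧ (u.length : Int) - 1 = (v.length : Int) - 1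
      · rw [if_pos hc3, if_pos (h3.mp hc3)]
      · rw [if_neg hc3, if_neg (fun h => hc3 (h3.mpr h))]

-- the cached loop of B computes relation_alt for every pair
def CacheOK (c : PySem.Dict (List Int × List Int) Int) : Prop :=
  ∀ k r, c.get? k = some r → r = relation_alt k.1 k.2

theorem inner_loop (u : List Int) (vs : List (List Int))
    (st : PySem.Dict (List Int × List Int) Int × List Int) (hc : CacheOK st.1) :
    (vs.foldl (fun st2 v =>
       match st2.1.get? (u, v) with
       | some r => (st2.1, st2.2 ++ [r])
       | none =>
         let r := relation_alt u v
         (st2.1.insert (u, v) r, st2.2 ++ [r])) st).2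
      = st.2 ++ vs.map (relation_alt u)
    ∧ CacheOK (vs.foldl (fun st2 v =>
       match st2.1.get? (u, v) with
       | some r => (st2.1, st2.2 ++ [r])
       | none =>
         let r := relation_alt u v
         (st2.1.insert (u, v) r, st2.2 ++ [r])) st).1 := by
  induction vs generalizing st with
  | nil => simpa using hc
  | cons v vs ih =>
    simp only [List.foldl_cons, List.map_cons]
    rcases h : st.1.get? (u, v) with _ | r
    · have hnew : CacheOK (st.1.insert (u, v) (relation_alt u v)) := by
        intro k r' hk
        rw [PySem.Dict.get?_insert] at hk
        split_ifs at hk with hke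
        · cases hk; rw [hke]
        · exact hc k r' hk
      have := ih (st.1.insert (u, v) (relation_alt u v), st.2 ++ [relation_alt u v]) hnew
      simpa using this
    · have hr : r = relation_alt u v := hc (u, v) r h
      have := ih (st.1, st.2 ++ [r]) hc
      simpa [hr] using this

theorem outer_loop (us vs : List (List Int))
    (st : PySem.Dict (List Int × List Int) Int × List Int) (hc : CacheOK st.1) :
    (us.foldl (fun st u => vs.foldl (fun st2 v =>
       match st2.1.get? (u, v) with
       | some r => (st2.1, st2.2 ++ [r])
       | none =>
         let r := relation_alt u v
         (st2.1.insert (u, v) r, st2.2 ++ [r])) st) st).2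
      = st.2 ++ us.flatMap (fun u => vs.map (relation_alt u))
    ∧ CacheOK (us.foldl (fun st u => vs.foldl (fun st2 v =>
       match st2.1.get? (u, v) with
       | some r => (st2.1, st2.2 ++ [r])
       | none =>
         let r := relation_alt u v
         (st2.1.insert (u, v) r, st2.2 ++ [r])) st) st).1 := by
  induction us generalizing st with
  | nil => simpa using hc
  | cons u us ih =>
    simp only [List.foldl_cons, List.flatMap_cons]
    obtain ⟨h2, h1⟩ := inner_loop u vs st hc
    have := ih _ h1
    rw [this.1, h2]
    exact ⟨by simp, this.2⟩

theorem alt_eq_flatMap (eot_arr : List (List Int)) (max_length : Int) :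
    generateNRPLabel_alt eot_arr max_length =
      (if max_length > 0
        then ((([] : List Int) :: eot_arr) ++ [[]] ++ List.replicate (max_length - 2 - (eot_arr.length : Int)).toNat []).take max_length.toNat
        else []).flatMap (fun u =>
          (if max_length > 0
            then ((([] : List Int) :: eot_arr) ++ [[]] ++ List.replicate (max_length - 2 - (eot_arr.length : Int)).toNat []).take max_length.toNat
            else []).map (relation_alt u)) := by
  unfold generateNRPLabel_alt
  have hempty : CacheOK (PySem.Dict.empty : PySem.Dict (List Int × List Int) Int) := by
    intro k r hk
    simp [PySem.Dict.get?_empty] at hk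
  by_cases h : max_length > 0
  · simp only [if_pos h, PySem.List.slice_to _ (le_of_lt h)]
    have := outer_loop
      ((((([] : List Int) :: eot_arr) ++ [[]] ++ List.replicate (max_length - 2 - (eot_arr.length : Int)).toNat []).take max_length.toNat))
      ((((([] : List Int) :: eot_arr) ++ [[]] ++ List.replicate (max_length - 2 - (eot_arr.length : Int)).toNat []).take max_length.toNat))
      (PySem.Dict.empty, []) hempty
    simpa using this.1
  · simp [if_neg h]

theorem a_eq_flatMap (eot_arr : List (List Int)) (max_length : Int) :
    generateNRPLabel eot_arr max_length =
      (PySem.List.pyRange 0 max_length 1).flatMap (fun i =>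
        (PySem.List.pyRange 0 max_length 1).map (fun j =>
          judgeRelation
            (PySem.List.pyGetD (((([] : List Int) :: eot_arr) ++ [[]] ++ List.replicate (max_length - 2 - (eot_arr.length : Int)).toNat []) : List (List Int)) i [])
            (PySem.List.pyGetD (((([] : List Int) :: eot_arr) ++ [[]] ++ List.replicate (max_length - 2 - (eot_arr.length : Int)).toNat []) : List (List Int)) j []))) := by
  unfold generateNRPLabel
  simp only [PySem.List.foldl_append_singleton_eq_map, PySem.List.foldl_append_eq_flatMap,
    List.nil_append, List.map_const', PySem.List.length_pyRange_one, Int.sub_zero,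
    List.cons_append, List.append_assoc]

theorem take_len_ge (eot_arr : List (List Int)) (max_length : Int) :
    max_length ≤ ((((([] : List Int) :: eot_arr) ++ [[]] ++ List.replicate (max_length - 2 - (eot_arr.length : Int)).toNat []) : List (List Int)).length : Int) := by
  simp only [List.length_cons, List.length_append, List.length_replicate, List.length_cons,
    List.length_nil]
  omega

-- ===== VERDICT (by name: the statement is the Claim_ definition above) =====
theorem generateNRPLabel_spec : Claim_equal_generateNRPLabel := by
  intro eot_arr max_length _
  unfold Spec_generateNRPLabel
  rw [alt_eq_flatMap, a_eq_flatMap]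
  by_cases h : max_length > 0
  · simp only [if_pos h]
    set P : List (List Int) := ((([] : List Int) :: eot_arr) ++ [[]] ++ List.replicate (max_length - 2 - (eot_arr.length : Int)).toNat []) with hP
    have hlen : max_length ≤ (P.length : Int) := take_len_ge eot_arr max_length
    have hget : ∀ i : Int, i ∈ PySem.List.pyRange 0 max_length 1 →
        PySem.List.pyGetD P i [] = (P.take max_length.toNat).getD i.toNat [] := by
      intro i hi
      rw [PySem.List.mem_pyRange_one] at hi
      have h1 : i.toNat < P.length := by omega
      have h2 : i.toNat < (P.take max_length.toNat).length := by
        simp only [List.length_take]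
        omega
      rw [PySem.List.pyGetD_eq_getElem _ _ hi.1 (by omega), List.getD_eq_getElem _ _ h2,
        List.getElem_take]
    have hmap : (PySem.List.pyRange 0 max_length 1).map (fun j => PySem.List.pyGetD P j []) =
        P.take max_length.toNat := by
      rw [List.map_congr_left (fun j hj => hget j hj)]
      have hlen2 : ((P.take max_length.toNat).length : Int) = max_length := by
        simp only [List.length_take]
        omega
      calc (PySem.List.pyRange 0 max_length 1).map (fun j => (P.take max_length.toNat).getD j.toNat [])
          = (PySem.List.pyRange 0 ((P.take max_length.toNat).length : Int) 1).map
              (fun j => PySem.List.pyGetD (P.take max_length.toNat) j []) := by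
            rw [hlen2]
            refine List.map_congr_left (fun j hj => ?_)
            rw [PySem.List.mem_pyRange_one] at hj
            rw [PySem.List.pyGetD_eq_getElem _ _ hj.1 (by omega),
              List.getD_eq_getElem _ _ (by omega)]
        _ = P.take max_length.toNat := by
            exact PySem.List.map_pyGetD_pyRange_zero' _ _
    calc (PySem.List.pyRange 0 max_length 1).flatMap (fun i =>
            (PySem.List.pyRange 0 max_length 1).map (fun j =>
              judgeRelation (PySem.List.pyGetD P i []) (PySem.List.pyGetD P j [])))
        = (PySem.List.pyRange 0 max_length 1).flatMap (fun i =>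
            (P.take max_length.toNat).map (relation_alt (PySem.List.pyGetD P i []))) := by
          refine List.flatMap_congr (fun i hi => ?_)
          rw [← hmap, List.map_map]
          exact List.map_congr_left (fun j hj => relation_eq _ _)
      _ = ((PySem.List.pyRange 0 max_length 1).map (fun i => PySem.List.pyGetD P i [])).flatMap
            (fun u => (P.take max_length.toNat).map (relation_alt u)) := by
          rw [List.flatMap_map]
      _ = (P.take max_length.toNat).flatMap (fun u => (P.take max_length.toNat).map (relation_alt u)) := by
          rw [hmap]
  · simp [if_neg h, PySem.List.pyRange_one_eq_nil (by omega : max_length ≤ 0)]
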